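-- pv_equiv track=rewrite | github.com/mozilla-services/socorro | socorro/services/currentVersions.py | create_order_by
-- ===== SOURCE A (Python) =====
-- available_columns = {
--     "product_version_id": "product_version_id ASC,",
--     "product_name": "product_name ASC,",
--     "version_string": "version_string ASC,",
--     "which_table": "which_table ASC,",
--     "start_date": "start_date ASC,",
--     "end_date": "end_date ASC,",
--     "is_featured": "is_featured ASC,",
--     "build_type": "build_type ASC,",
--     "throttle": "throttle ASC,",
--     "-product_version_id": "product_version_id DESC,",
--     "-product_name": "product_name DESC,",
--     "-version_string": "version_string DESC,",
--     "-which_table": "which_table DESC,",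
--     "-start_date": "start_date DESC,",
--     "-end_date": "end_date DESC,",
--     "-is_featured": "is_featured DESC,",
--     "-build_type": "build_type DESC,",
--     "-throttle": "throttle DESC,", }
--
-- def create_order_by(user_input):
--     result = ""
--     for x in user_input:
--         if x in available_columns:
--             result += available_columns[x]
--     if not result:
--         return result
--     else:
--         return """ ORDER BY %s """ % result.strip(',')
-- ===== SOURCE B (Python) =====
-- VALID_COLUMNS = {
--     "product_version_id", "product_name", "version_string", "which_table",
--     "start_date", "end_date", "is_featured", "build_type", "throttle",
-- }
--
-- def create_order_by(user_input):
--     parts = []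
--     for x in user_input:
--         desc = x.startswith('-')
--         base = x[1:] if desc else x
--         if base in VALID_COLUMNS:
--             parts.append(base + (" DESC" if desc else " ASC"))
--     if not parts:
--         return ""
--     return " ORDER BY %s " % ",".join(parts)
-- ===== Notes on version B (the rewrite author's own statement) =====
-- stated objective: simpler
-- what changed: Replaces the 18-entry key->fragment lookup table and string concatenation with a 9-name set: the direction (ASC/DESC) and the SQL fragment are computed from the '-' prefix of each key, parts are collected in a list and joined with commas instead of concatenating and stripping a trailing comma.
import Mathlib
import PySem

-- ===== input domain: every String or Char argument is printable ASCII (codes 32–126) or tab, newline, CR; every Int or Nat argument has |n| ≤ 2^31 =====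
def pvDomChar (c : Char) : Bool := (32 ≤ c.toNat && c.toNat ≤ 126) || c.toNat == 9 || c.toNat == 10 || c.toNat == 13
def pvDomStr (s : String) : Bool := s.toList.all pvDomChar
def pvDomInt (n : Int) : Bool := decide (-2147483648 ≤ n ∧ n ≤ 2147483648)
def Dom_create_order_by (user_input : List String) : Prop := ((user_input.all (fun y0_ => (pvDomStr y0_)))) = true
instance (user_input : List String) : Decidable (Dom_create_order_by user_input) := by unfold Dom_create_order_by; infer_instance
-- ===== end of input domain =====

-- B replaces A's 18-entry key->fragment dict and comma-stripped string concatenation by a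
-- 9-name set: direction and fragment are computed from the '-' prefix and the parts joined
-- with ',' (objective: simpler; the return value is proved identical on all inputs).

-- ===== PORT A =====
def availableColumns : PySem.Dict String String := PySem.Dict.ofList
  [ ("product_version_id", "product_version_id ASC,"),
    ("product_name", "product_name ASC,"),
    ("version_string", "version_string ASC,"),
    ("which_table", "which_table ASC,"),
    ("start_date", "start_date ASC,"),
    ("end_date", "end_date ASC,"),
    ("is_featured", "is_featured ASC,"),
    ("build_type", "build_type ASC,"),
    ("throttle", "throttle ASC,"),
    ("-product_version_id", "product_version_id DESC,"),
    ("-product_name", "product_name DESC,"),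
    ("-version_string", "version_string DESC,"),
    ("-which_table", "which_table DESC,"),
    ("-start_date", "start_date DESC,"),
    ("-end_date", "end_date DESC,"),
    ("-is_featured", "is_featured DESC,"),
    ("-build_type", "build_type DESC,"),
    ("-throttle", "throttle DESC,") ]

-- loop body of A: 'if x in available_columns: result += available_columns[x]'
-- (the running string is carried as List Char, PySem's string representation)
def stepA (r : List Char) (x : String) : List Char :=
  match availableColumns.get? x with
  | some frag => r ++ frag.toList
  | none => r

def create_order_by (user_input : List String) : String :=
  let result : List Char := user_input.foldl stepA []
  if result = [] then ""
  else String.ofList (" ORDER BY ".toList ++ PySem.Chars.stripChars result ",".toList ++ " ".toList)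

-- ===== PORT B =====
def validColumns : PySem.Set String := PySem.Set.ofList
  ["product_version_id", "product_name", "version_string", "which_table", "start_date", "end_date", "is_featured", "build_type", "throttle"]

-- loop body of B: strip the optional '-' prefix, test membership in the 9-name set,
-- and append "<base> DESC"/"<base> ASC" to the parts list
def stepB (ps : List (List Char)) (x : String) : List (List Char) :=
  let desc := PySem.Str.startswith x "-"
  let base := if desc then PySem.Str.slice x (some 1) none else x
  if validColumns.contains base then
    ps ++ [base.toList ++ (if desc then " DESC".toList else " ASC".toList)]
  else ps

def create_order_by_alt (user_input : List String) : String :=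
  let parts : List (List Char) := user_input.foldl stepB []
  if parts = [] then ""
  else String.ofList (" ORDER BY ".toList ++ PySem.Chars.join ",".toList parts ++ " ".toList)

-- ===== PRECONDITION & SPEC =====
def Spec_create_order_by (user_input : List String) (out : String) : Prop := out = create_order_by_alt user_input
instance (user_input : List String) (out : String) : Decidable (Spec_create_order_by user_input out) := by unfold Spec_create_order_by; infer_instance

-- ===== CLAIM (what is proved, stated in full; the proofs are below) =====
def Claim_equal_create_order_by : Prop := ∀ (user_input : List String), Dom_create_order_by user_input → Spec_create_order_by user_input (create_order_by user_input)

-- ===== LEMMAS AND PROOFS =====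

-- per-element contribution of A's loop body
def contribA (x : String) : Option (List Char) := (availableColumns.get? x).map String.toList
-- per-element contribution of B's loop body
def contribB (x : String) : Option (List Char) :=
  let desc := PySem.Str.startswith x "-"
  let base := if desc then PySem.Str.slice x (some 1) none else x
  if validColumns.contains base then
    some (base.toList ++ (if desc then " DESC".toList else " ASC".toList))
  else none

-- a descending key recognised by B is literally "-" ++ base
lemma neg_key_eq (x k : String)
    (hdesc : PySem.Str.startswith x "-" = true)
    (hbase : (if PySem.Str.startswith x "-" then PySem.Str.slice x (some 1) none else x) = k) :
    x = String.ofList ('-' :: k.toList) := by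
  rw [hdesc] at hbase
  simp only [if_pos] at hbase
  rw [PySem.Str.startswith_eq, PySem.Chars.startswith_iff] at hdesc
  have hm : "-".toList = ['-'] := by decide
  rw [hm] at hdesc
  obtain ⟨t, ht⟩ := hdesc
  have hb : k.toList = t := by
    have h2 := congrArg String.toList hbase
    rw [PySem.Str.toList_slice] at h2
    simp only [PySem.Chars.slice, PySem.List.slice_from_one] at h2
    rw [← ht] at h2
    simpa using h2.symm
  have hx : x.toList = '-' :: k.toList := by rw [hb, ← ht]; rfl
  calc x = String.ofList x.toList := by simp
    _ = String.ofList ('-' :: k.toList) := by rw [hx]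

lemma validColumns_lit : validColumns = ["product_version_id", "product_name", "version_string", "which_table", "start_date", "end_date", "is_featured", "build_type", "throttle"] := by decide

-- the central per-element fact: A's fragment is B's part plus a trailing comma
lemma contrib_eq (x : String) : contribA x = (contribB x).map (· ++ [',']) := by
  by_cases e1 : x = "product_version_id"
  · subst e1; decide
  by_cases e2 : x = "product_name"
  · subst e2; decide
  by_cases e3 : x = "version_string"
  · subst e3; decide
  by_cases e4 : x = "which_table"
  · subst e4; decide
  by_cases e5 : x = "start_date"
  · subst e5; decide
  by_cases e6 : x = "end_date"
  · subst e6; decide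
  by_cases e7 : x = "is_featured"
  · subst e7; decide
  by_cases e8 : x = "build_type"
  · subst e8; decide
  by_cases e9 : x = "throttle"
  · subst e9; decide
  by_cases e10 : x = "-product_version_id"
  · subst e10; decide
  by_cases e11 : x = "-product_name"
  · subst e11; decide
  by_cases e12 : x = "-version_string"
  · subst e12; decide
  by_cases e13 : x = "-which_table"
  · subst e13; decide
  by_cases e14 : x = "-start_date"
  · subst e14; decide
  by_cases e15 : x = "-end_date"
  · subst e15; decide
  by_cases e16 : x = "-is_featured"
  · subst e16; decide
  by_cases e17 : x = "-build_type"
  · subst e17; decide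
  by_cases e18 : x = "-throttle"
  · subst e18; decide
  have hA : contribA x = none := by
    have hd : availableColumns = PySem.Dict.mk [ ("product_version_id", "product_version_id ASC,"),
    ("product_name", "product_name ASC,"),
    ("version_string", "version_string ASC,"),
    ("which_table", "which_table ASC,"),
    ("start_date", "start_date ASC,"),
    ("end_date", "end_date ASC,"),
    ("is_featured", "is_featured ASC,"),
    ("build_type", "build_type ASC,"),
    ("throttle", "throttle ASC,"),
    ("-product_version_id", "product_version_id DESC,"),
    ("-product_name", "product_name DESC,"),
    ("-version_string", "version_string DESC,"),
    ("-which_table", "which_table DESC,"),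
    ("-start_date", "start_date DESC,"),
    ("-end_date", "end_date DESC,"),
    ("-is_featured", "is_featured DESC,"),
    ("-build_type", "build_type DESC,"),
    ("-throttle", "throttle DESC,") ] := by decide
    unfold contribA
    rw [hd]
    simp [PySem.Dict.get?, Ne.symm e1, Ne.symm e2, Ne.symm e3, Ne.symm e4, Ne.symm e5, Ne.symm e6, Ne.symm e7, Ne.symm e8, Ne.symm e9, Ne.symm e10, Ne.symm e11, Ne.symm e12, Ne.symm e13, Ne.symm e14, Ne.symm e15, Ne.symm e16, Ne.symm e17, Ne.symm e18]
  have hB : contribB x = none := by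
    unfold contribB
    by_cases hdesc : PySem.Str.startswith x "-"
    · by_cases hc : validColumns.contains (if PySem.Str.startswith x "-" then PySem.Str.slice x (some 1) none else x) = true
      · exfalso
        have hmem := hc
        rw [validColumns_lit] at hmem
        simp only [PySem.Set.contains, List.contains_eq_mem, List.mem_cons, List.not_mem_nil, or_false, decide_eq_true_eq] at hmem
        rcases hmem with hb | hb | hb | hb | hb | hb | hb | hb | hb
        · have hx := neg_key_eq x "product_version_id" hdesc hb
          exact absurd (hx.trans (by decide)) e10
        · have hx := neg_key_eq x "product_name" hdesc hb
          exact absurd (hx.trans (by decide)) e11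
        · have hx := neg_key_eq x "version_string" hdesc hb
          exact absurd (hx.trans (by decide)) e12
        · have hx := neg_key_eq x "which_table" hdesc hb
          exact absurd (hx.trans (by decide)) e13
        · have hx := neg_key_eq x "start_date" hdesc hb
          exact absurd (hx.trans (by decide)) e14
        · have hx := neg_key_eq x "end_date" hdesc hb
          exact absurd (hx.trans (by decide)) e15
        · have hx := neg_key_eq x "is_featured" hdesc hb
          exact absurd (hx.trans (by decide)) e16
        · have hx := neg_key_eq x "build_type" hdesc hb
          exact absurd (hx.trans (by decide)) e17
        · have hx := neg_key_eq x "throttle" hdesc hb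
          exact absurd (hx.trans (by decide)) e18
      · simp only [Bool.not_eq_true] at hc
        simp only [hc, Bool.false_eq_true, if_false]
    · simp only [Bool.not_eq_true] at hdesc
      have hcx : validColumns.contains x = false := by
        rw [validColumns_lit]
        simp [PySem.Set.contains, List.contains_eq_mem, e1, e2, e3, e4, e5, e6, e7, e8, e9]
      simp only [hdesc, Bool.false_eq_true, if_false, hcx]
  rw [hA, hB]; rfl

-- parts produced by B are nonempty and neither start nor end with a comma
def GoodPart (p : List Char) : Prop := p ≠ [] ∧ p.head? ≠ some ',' ∧ p.getLast? ≠ some ','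

lemma contribB_good (x : String) (v : List Char) (h : contribB x = some v) : GoodPart v := by
  unfold contribB at h
  by_cases hc : validColumns.contains (if PySem.Str.startswith x "-" then PySem.Str.slice x (some 1) none else x) = true
  · rw [if_pos hc] at h
    have hmem := hc
    rw [validColumns_lit] at hmem
    simp only [PySem.Set.contains, List.contains_eq_mem, List.mem_cons, List.not_mem_nil, or_false, decide_eq_true_eq] at hmem
    rcases hmem with hb | hb | hb | hb | hb | hb | hb | hb | hb
    · cases hdx : PySem.Str.startswith x "-" <;> rw [hdx] at h hb <;>
        simp only [Bool.false_eq_true, if_false, if_true] at h hb <;> rw [hb] at h <;>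
        (obtain rfl := Option.some.inj h; exact ⟨by decide, by decide, by decide⟩)
    · cases hdx : PySem.Str.startswith x "-" <;> rw [hdx] at h hb <;>
        simp only [Bool.false_eq_true, if_false, if_true] at h hb <;> rw [hb] at h <;>
        (obtain rfl := Option.some.inj h; exact ⟨by decide, by decide, by decide⟩)
    · cases hdx : PySem.Str.startswith x "-" <;> rw [hdx] at h hb <;>
        simp only [Bool.false_eq_true, if_false, if_true] at h hb <;> rw [hb] at h <;>
        (obtain rfl := Option.some.inj h; exact ⟨by decide, by decide, by decide⟩)
    · cases hdx : PySem.Str.startswith x "-" <;> rw [hdx] at h hb <;>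
        simp only [Bool.false_eq_true, if_false, if_true] at h hb <;> rw [hb] at h <;>
        (obtain rfl := Option.some.inj h; exact ⟨by decide, by decide, by decide⟩)
    · cases hdx : PySem.Str.startswith x "-" <;> rw [hdx] at h hb <;>
        simp only [Bool.false_eq_true, if_false, if_true] at h hb <;> rw [hb] at h <;>
        (obtain rfl := Option.some.inj h; exact ⟨by decide, by decide, by decide⟩)
    · cases hdx : PySem.Str.startswith x "-" <;> rw [hdx] at h hb <;>
        simp only [Bool.false_eq_true, if_false, if_true] at h hb <;> rw [hb] at h <;>
        (obtain rfl := Option.some.inj h; exact ⟨by decide, by decide, by decide⟩)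
    · cases hdx : PySem.Str.startswith x "-" <;> rw [hdx] at h hb <;>
        simp only [Bool.false_eq_true, if_false, if_true] at h hb <;> rw [hb] at h <;>
        (obtain rfl := Option.some.inj h; exact ⟨by decide, by decide, by decide⟩)
    · cases hdx : PySem.Str.startswith x "-" <;> rw [hdx] at h hb <;>
        simp only [Bool.false_eq_true, if_false, if_true] at h hb <;> rw [hb] at h <;>
        (obtain rfl := Option.some.inj h; exact ⟨by decide, by decide, by decide⟩)
    · cases hdx : PySem.Str.startswith x "-" <;> rw [hdx] at h hb <;>
        simp only [Bool.false_eq_true, if_false, if_true] at h hb <;> rw [hb] at h <;>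
        (obtain rfl := Option.some.inj h; exact ⟨by decide, by decide, by decide⟩)
  · rw [if_neg hc] at h
    simp at h

lemma stepA_eq (r : List Char) (x : String) : stepA r x = r ++ (contribA x).getD [] := by
  unfold stepA contribA
  cases availableColumns.get? x <;> simp

lemma stepB_eq (ps : List (List Char)) (x : String) : stepB ps x = ps ++ (contribB x).toList := by
  unfold stepB contribB
  by_cases hc : validColumns.contains (if PySem.Str.startswith x "-" then PySem.Str.slice x (some 1) none else x) = true
  · rw [if_pos hc, if_pos hc]
    rfl
  · rw [if_neg hc, if_neg hc]
    simp

def flatParts (ps : List (List Char)) : List Char := (ps.map (· ++ [','])).flatten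

lemma flatParts_eq_nil (ps : List (List Char)) : flatParts ps = [] ↔ ps = [] := by
  cases ps <;> simp [flatParts]

lemma fold_eq : ∀ (xs : List String) (ps : List (List Char)),
    xs.foldl stepA (flatParts ps) = flatParts (xs.foldl stepB ps) := by
  intro xs
  induction xs with
  | nil => intro ps; rfl
  | cons x xs ih =>
    intro ps
    simp only [List.foldl_cons]
    rw [stepA_eq, stepB_eq, contrib_eq]
    cases hB : contribB x with
    | none => simpa using ih ps
    | some v =>
      have h1 : flatParts ps ++ ((Option.map (· ++ [',']) (some v)).getD []) = flatParts (ps ++ [v]) := by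
        simp [flatParts]
      rw [h1, Option.toList_some]
      exact ih (ps ++ [v])

lemma fold_good : ∀ (xs : List String) (ps : List (List Char)),
    (∀ p ∈ ps, GoodPart p) → ∀ p ∈ xs.foldl stepB ps, GoodPart p := by
  intro xs
  induction xs with
  | nil => intro ps h; exact h
  | cons x xs ih =>
    intro ps h
    simp only [List.foldl_cons]
    rw [stepB_eq]
    apply ih
    intro p hp
    rcases List.mem_append.mp hp with h1 | h2
    · exact h p h1
    · cases hB : contribB x with
      | none => rw [hB] at h2; simp at h2
      | some v =>
        rw [hB] at h2
        simp only [Option.toList_some, List.mem_singleton] at h2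
        subst h2
        exact contribB_good x _ hB

lemma flat_eq (ps : List (List Char)) (h : ps ≠ []) :
    flatParts ps = List.intercalate [','] ps ++ [','] := by
  induction ps with
  | nil => exact absurd rfl h
  | cons p ps ih =>
    cases ps with
    | nil => simp [flatParts, List.intercalate]
    | cons q qs =>
      have hq : flatParts (q :: qs) = List.intercalate [','] (q :: qs) ++ [','] := ih (by simp)
      have h1 : flatParts (p :: q :: qs) = (p ++ [',']) ++ flatParts (q :: qs) := by simp [flatParts]
      have h2 : List.intercalate [','] (p :: q :: qs) = p ++ [','] ++ List.intercalate [','] (q :: qs) := by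
        simp [List.intercalate]
      rw [h1, hq, h2]
      simp

lemma intercalate_getLast? (ps : List (List Char)) (h : ps ≠ []) (hg : ∀ p ∈ ps, GoodPart p) :
    (List.intercalate [','] ps).getLast? = (ps.getLast h).getLast? := by
  induction ps with
  | nil => exact absurd rfl h
  | cons p ps ih =>
    cases ps with
    | nil => simp [List.intercalate]
    | cons q qs =>
      have h2 : List.intercalate [','] (p :: q :: qs) = p ++ [','] ++ List.intercalate [','] (q :: qs) := by
        simp [List.intercalate]
      have hne : List.intercalate [','] (q :: qs) ≠ [] := by
        have hq : GoodPart q := hg q (by simp)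
        cases qs with
        | nil => simpa [List.intercalate] using hq.1
        | cons r rs =>
          have h3 : List.intercalate [','] (q :: r :: rs) = q ++ [','] ++ List.intercalate [','] (r :: rs) := by
            simp [List.intercalate]
          rw [h3]
          simp
      rw [h2, List.getLast?_append, ih (by simp) (fun p hp => hg p (List.mem_cons_of_mem _ hp))]
      have hlast : (p :: q :: qs).getLast h = (q :: qs).getLast (by simp) := by
        simp [List.getLast]
      rw [hlast]
      have hqne : (q :: qs).getLast (by simp) ∈ (q :: qs) := List.getLast_mem _
      have : ((q :: qs).getLast (by simp)).getLast? ≠ none := by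
        have hgq : GoodPart ((q :: qs).getLast (by simp)) := hg _ (List.mem_cons_of_mem _ hqne)
        cases hx : ((q :: qs).getLast (by simp)).getLast? with
        | none => exact absurd (List.getLast?_eq_none_iff.mp hx) hgq.1
        | some c => simp
      cases hx : ((q :: qs).getLast (by simp)).getLast? with
      | none => exact absurd hx this
      | some c => simp

lemma strip_join (ps : List (List Char)) (h : ps ≠ []) (hg : ∀ p ∈ ps, GoodPart p) :
    PySem.Chars.stripChars (flatParts ps) ",".toList = PySem.Chars.join ",".toList ps := by
  have hcomma : ",".toList = [','] := by decide
  rw [hcomma, flat_eq ps h]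
  have hjoin : PySem.Chars.join [','] ps = List.intercalate [','] ps := rfl
  rw [hjoin]
  -- head of the intercalation: first char of the first part, not a comma
  obtain ⟨p0, rest, rfl⟩ : ∃ p0 rest, ps = p0 :: rest := by
    cases ps with
    | nil => exact absurd rfl h
    | cons a l => exact ⟨a, l, rfl⟩
  have hg0 : GoodPart p0 := hg p0 (by simp)
  obtain ⟨c0, p1, rfl⟩ := List.exists_cons_of_ne_nil hg0.1
  have hc0 : c0 ≠ ',' := by simpa using hg0.2.1
  have hthead : (List.intercalate [','] ((c0 :: p1) :: rest)).head? = some c0 := by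
    cases rest with
    | nil => simp [List.intercalate]
    | cons q qs =>
      have h2 : List.intercalate [','] ((c0 :: p1) :: q :: qs)
          = (c0 :: p1) ++ ([','] ++ List.intercalate [','] (q :: qs)) := by
        simp [List.intercalate]
      rw [h2, List.head?_append_of_ne_nil _ (by simp)]
      rfl
  obtain ⟨t1, ht1⟩ := List.head?_eq_some_iff.mp hthead
  -- last char of the intercalation: last char of the last part, not a comma
  have htlast := intercalate_getLast? ((c0 :: p1) :: rest) (by simp) hg
  have hlastgood : GoodPart (((c0 :: p1) :: rest).getLast (by simp)) := hg _ (List.getLast_mem _)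
  obtain ⟨cl, hcl⟩ : ∃ cl, (((c0 :: p1) :: rest).getLast (by simp)).getLast? = some cl := by
    cases hx : (((c0 :: p1) :: rest).getLast (by simp)).getLast? with
    | none => exact absurd (List.getLast?_eq_none_iff.mp hx) hlastgood.1
    | some c => exact ⟨c, rfl⟩
  have hclne : cl ≠ ',' := by
    intro hcc
    subst hcc
    exact hlastgood.2.2 hcl
  have htl : (List.intercalate [','] ((c0 :: p1) :: rest)).getLast? = some cl := by
    rw [htlast]; exact hcl
  -- now compute the two dropWhiles of stripChars
  show (List.dropWhile (fun c => [','].contains c)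
      (List.dropWhile (fun c => [','].contains c)
        (List.intercalate [','] ((c0 :: p1) :: rest) ++ [','])).reverse).reverse
    = List.intercalate [','] ((c0 :: p1) :: rest)
  have hls : List.dropWhile (fun c => [','].contains c)
      (List.intercalate [','] ((c0 :: p1) :: rest) ++ [',']) =
      List.intercalate [','] ((c0 :: p1) :: rest) ++ [','] := by
    rw [ht1]
    rw [List.cons_append, List.dropWhile_cons_of_neg (by simp [hc0])]
  rw [hls, List.reverse_append]
  have hrevhead : (List.intercalate [','] ((c0 :: p1) :: rest)).reverse.head? = some cl := by
    rw [List.head?_reverse]; exact htl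
  obtain ⟨w, hw⟩ := List.head?_eq_some_iff.mp hrevhead
  have hrs : List.dropWhile (fun c => [','].contains c)
      ([','].reverse ++ (List.intercalate [','] ((c0 :: p1) :: rest)).reverse) =
      (List.intercalate [','] ((c0 :: p1) :: rest)).reverse := by
    rw [show ([','] : List Char).reverse = [','] from rfl, hw]
    rw [List.cons_append, List.dropWhile_cons_of_pos (by simp), List.nil_append,
      List.dropWhile_cons_of_neg (by simp [hclne])]
  rw [hrs, List.reverse_reverse]

-- ===== VERDICT (by name: the statement is the Claim_ definition above) =====
theorem create_order_by_spec : Claim_equal_create_order_by := by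
  unfold Claim_equal_create_order_by
  intro user_input _
  unfold Spec_create_order_by create_order_by create_order_by_alt
  simp only
  have hfold := fold_eq user_input []
  have hgood := fold_good user_input [] (by intro p hp; simp at hp)
  rw [show flatParts ([] : List (List Char)) = [] from rfl] at hfold
  rw [hfold]
  by_cases hp : user_input.foldl stepB [] = []
  · rw [hp]
    rfl
  · rw [if_neg ((not_iff_not.mpr (flatParts_eq_nil _)).mpr hp), if_neg hp,
      strip_join _ hp hgood]
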